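-- pv_equiv track=rewrite | github.com/lariach/multilabel-classification-bilstm | 05_app/demo.py | interpret_binary_to_string_label
-- ===== SOURCE A (Python) =====
-- def interpret_binary_to_string_label(binary_predictions):
--     label_map = {
--         (1, 0, 0): "hukum", (0, 1, 0): "politik", (0, 0, 1): "nasional",
--         (1, 1, 0): "hukum-politik", (1, 0, 1): "hukum-nasional",
--         (0, 1, 1): "politik-nasional", (1, 1, 1): "hukum-politik-nasional",
--         (0, 0, 0): "lainnya"
--     }
--     final_labels = [label_map.get(tuple(pred), "lainnya") for pred in binary_predictions]
--     return final_labels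
-- ===== SOURCE B (Python) =====
-- def interpret_binary_to_string_label(binary_predictions):
--     names = ["hukum", "politik", "nasional"]
--     final_labels = []
--     for pred in binary_predictions:
--         p = list(pred)
--         if len(p) == 3 and all(v == 0 or v == 1 for v in p):
--             parts = [names[i] for i in range(3) if p[i] == 1]
--             final_labels.append("-".join(parts) if parts else "lainnya")
--         else:
--             final_labels.append("lainnya")
--     return final_labels
-- ===== Notes on version B (the rewrite author's own statement) =====
-- stated objective: simpler
-- what changed: Replaces the 8-entry tuple-to-label lookup dict with compositional construction: validate that the prediction is a length-3 0/1 vector, then join the names of the set bits with '-', falling back to 'lainnya'.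
import Mathlib
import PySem

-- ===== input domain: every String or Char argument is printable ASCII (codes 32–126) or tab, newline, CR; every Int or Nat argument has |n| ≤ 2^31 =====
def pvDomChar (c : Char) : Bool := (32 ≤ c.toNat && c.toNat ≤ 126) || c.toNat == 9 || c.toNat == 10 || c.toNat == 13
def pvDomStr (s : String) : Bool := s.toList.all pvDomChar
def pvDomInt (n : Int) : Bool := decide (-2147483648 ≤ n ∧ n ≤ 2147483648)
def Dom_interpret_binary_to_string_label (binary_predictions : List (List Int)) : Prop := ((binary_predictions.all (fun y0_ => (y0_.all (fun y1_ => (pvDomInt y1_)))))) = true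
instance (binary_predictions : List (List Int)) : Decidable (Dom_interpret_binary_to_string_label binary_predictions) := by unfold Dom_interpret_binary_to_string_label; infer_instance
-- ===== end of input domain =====

-- B replaces A's 8-entry lookup dict by compositional label construction (validate a length-3 0/1 vector, join names of set bits); objective: simpler.

-- ===== PORT A =====
-- dict literal with distinct keys: transliterated as the items list directly
def pvLabelMap : PySem.Dict (List Int) String :=
  PySem.Dict.mk
    [([1, 0, 0], "hukum"), ([0, 1, 0], "politik"), ([0, 0, 1], "nasional"),
     ([1, 1, 0], "hukum-politik"), ([1, 0, 1], "hukum-nasional"),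
     ([0, 1, 1], "politik-nasional"), ([1, 1, 1], "hukum-politik-nasional"),
     ([0, 0, 0], "lainnya")]

def interpret_binary_to_string_label (binary_predictions : List (List Int)) : List String :=
  binary_predictions.map (fun pred => pvLabelMap.getD pred "lainnya")

-- ===== PORT B =====
def pvNames : List String := ["hukum", "politik", "nasional"]

def pvAltOne (pred : List Int) : String :=
  let p := pred
  if p.length = 3 ∧ p.all (fun v => v == 0 || v == 1) then
    let parts := ((PySem.List.pyRange 0 3 1).filter
        (fun i => PySem.List.pyGetD p i 0 == 1)).map
        (fun i => PySem.List.pyGetD pvNames i "")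
    if parts = [] then "lainnya" else PySem.Str.join "-" parts
  else "lainnya"

def interpret_binary_to_string_label_alt (binary_predictions : List (List Int)) : List String :=
  binary_predictions.foldl (fun acc pred => acc ++ [pvAltOne pred]) []

-- ===== PRECONDITION & SPEC =====
def Spec_interpret_binary_to_string_label (binary_predictions : List (List Int)) (out : List String) : Prop := out = interpret_binary_to_string_label_alt binary_predictions
instance (binary_predictions : List (List Int)) (out : List String) : Decidable (Spec_interpret_binary_to_string_label binary_predictions out) := by unfold Spec_interpret_binary_to_string_label; infer_instance

-- ===== CLAIM (what is proved, stated in full; the proofs are below) =====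
def Claim_equal_interpret_binary_to_string_label : Prop := ∀ (binary_predictions : List (List Int)), Dom_interpret_binary_to_string_label binary_predictions → Spec_interpret_binary_to_string_label binary_predictions (interpret_binary_to_string_label binary_predictions)

-- ===== LEMMAS AND PROOFS =====
lemma pvAlt_eq_map (bp : List (List Int)) :
    interpret_binary_to_string_label_alt bp = bp.map pvAltOne := by
  unfold interpret_binary_to_string_label_alt
  induction bp using List.reverseRecOn with
  | nil => rfl
  | append_singleton xs x ih => simp [ih]

lemma pvOne_eq (p : List Int) : pvLabelMap.getD p "lainnya" = pvAltOne p := by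
  match p with
  | [] => decide
  | [a] =>
    simp [pvLabelMap, pvAltOne, PySem.Dict.getD, PySem.Dict.get?, List.cons_beq_cons]
  | [a, b] =>
    simp [pvLabelMap, pvAltOne, PySem.Dict.getD, PySem.Dict.get?, List.cons_beq_cons]
  | [a, b, c] =>
    by_cases ha : a = 0 ∨ a = 1
    · by_cases hb : b = 0 ∨ b = 1
      · by_cases hc : c = 0 ∨ c = 1
        · rcases ha with rfl | rfl <;> rcases hb with rfl | rfl <;> rcases hc with rfl | rfl <;> decide
        · push Not at hc
          simp [pvLabelMap, pvAltOne, PySem.Dict.getD, PySem.Dict.get?, List.cons_beq_cons, hc.1, hc.2, Ne.symm hc.1, Ne.symm hc.2]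
      · push Not at hb
        simp [pvLabelMap, pvAltOne, PySem.Dict.getD, PySem.Dict.get?, List.cons_beq_cons, hb.1, hb.2, Ne.symm hb.1, Ne.symm hb.2]
    · push Not at ha
      simp [pvLabelMap, pvAltOne, PySem.Dict.getD, PySem.Dict.get?, List.cons_beq_cons, ha.1, ha.2, Ne.symm ha.1, Ne.symm ha.2]
  | a :: b :: c :: d :: rest =>
    simp [pvLabelMap, pvAltOne, PySem.Dict.getD, PySem.Dict.get?, List.cons_beq_cons]

-- ===== VERDICT (by name: the statement is the Claim_ definition above) =====
theorem interpret_binary_to_string_label_spec : Claim_equal_interpret_binary_to_string_label := by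
  intro bp _
  unfold Spec_interpret_binary_to_string_label interpret_binary_to_string_label
  rw [pvAlt_eq_map]
  exact List.map_congr_left (fun p _ => pvOne_eq p)
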